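-- pv_equiv track=rewrite | github.com/ncisternamena1/ExamenTransversal | funciones.py | comprobarasiento
-- ===== SOURCE A (Python) =====
-- def comprobarasiento(arreglo,num_asiento):
--     x = 0
--     for f in range(10):
--         for c in range(10):
--             x = x + 1
--             if str(x) == str(num_asiento):
--                 if arreglo[f][c] == 'X':
--                     return False
--     return True
-- ===== SOURCE B (Python) =====
-- def comprobarasiento(arreglo, num_asiento):
--     # Direct index computation instead of scanning all 100 seats.
--     if 1 <= num_asiento <= 100:
--         f, c = divmod(num_asiento - 1, 10)
--         return arreglo[f][c] != 'X'
--     return True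
-- ===== Notes on version B (the rewrite author's own statement) =====
-- stated objective: simpler
-- what changed: Replaces the nested 10x10 counting loop with string matching by a closed-form bounds check and divmod index computation into the grid.
import Mathlib
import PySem

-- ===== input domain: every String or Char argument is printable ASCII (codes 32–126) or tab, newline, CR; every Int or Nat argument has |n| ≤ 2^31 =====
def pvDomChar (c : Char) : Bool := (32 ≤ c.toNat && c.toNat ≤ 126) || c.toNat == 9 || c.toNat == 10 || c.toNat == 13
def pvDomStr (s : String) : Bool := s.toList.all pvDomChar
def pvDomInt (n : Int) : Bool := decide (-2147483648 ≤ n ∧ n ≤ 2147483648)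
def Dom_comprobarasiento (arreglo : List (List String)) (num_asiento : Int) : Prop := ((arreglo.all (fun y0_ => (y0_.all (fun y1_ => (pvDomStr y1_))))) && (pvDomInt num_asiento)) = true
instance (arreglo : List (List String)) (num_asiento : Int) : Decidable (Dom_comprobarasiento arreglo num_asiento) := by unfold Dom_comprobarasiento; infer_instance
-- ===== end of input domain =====

-- B replaces A's nested 10x10 counting scan (comparing str(x) to str(num_asiento) at every
-- seat) by a closed-form bounds check plus divmod index computation; objective: simpler.

-- ===== PORT A =====
-- Early return is modelled with the Except monad: Except.error b = "return b from inside the loop".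
def comprobarasiento (arreglo : List (List String)) (num_asiento : Int) : Bool :=
  match
    (List.range 10).foldlM (fun (x : Int) (f : Nat) =>
      (List.range 10).foldlM (fun (x : Int) (c : Nat) =>
        let x := x + 1
        if PySem.Int.toStr x = PySem.Int.toStr num_asiento then
          if (PySem.List.pyGet? ((PySem.List.pyGet? arreglo (f : Int)).getD []) (c : Int)).getD "" = "X" then
            Except.error false
          else Except.ok x
        else Except.ok x) x) (0 : Int)
  with
  | .error b => b
  | .ok _ => true

-- ===== PORT B =====
def comprobarasiento_alt (arreglo : List (List String)) (num_asiento : Int) : Bool :=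
  if 1 ≤ num_asiento ∧ num_asiento ≤ 100 then
    let f := PySem.Int.floordiv (num_asiento - 1) 10
    let c := PySem.Int.mod (num_asiento - 1) 10
    !((PySem.List.pyGet? ((PySem.List.pyGet? arreglo f).getD []) c).getD "" = "X")
  else true

-- ===== PRECONDITION & SPEC =====
-- Pre_ excludes exactly the inputs where Python A raises IndexError: a seat number 1..100
-- whose matched cell (row (n-1)//10, column (n-1)%10) does not exist in the grid.
def Pre_comprobarasiento (arreglo : List (List String)) (num_asiento : Int) : Prop :=
  1 ≤ num_asiento → num_asiento ≤ 100 →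
    (PySem.List.pyGet? ((PySem.List.pyGet? arreglo (PySem.Int.floordiv (num_asiento - 1) 10)).getD []) (PySem.Int.mod (num_asiento - 1) 10)).isSome
instance (arreglo : List (List String)) (num_asiento : Int) : Decidable (Pre_comprobarasiento arreglo num_asiento) := by unfold Pre_comprobarasiento; infer_instance

def pvWitness_comprobarasiento : List (List String) × Int := ([["O", "O", "O", "X", "O"]], 4)

def Spec_comprobarasiento (arreglo : List (List String)) (num_asiento : Int) (out : Bool) : Prop := out = comprobarasiento_alt arreglo num_asiento
instance (arreglo : List (List String)) (num_asiento : Int) (out : Bool) : Decidable (Spec_comprobarasiento arreglo num_asiento out) := by unfold Spec_comprobarasiento; infer_instance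

-- ===== CLAIM (what is proved, stated in full; the proofs are below) =====
def Claim_equal_comprobarasiento : Prop := ∀ (arreglo : List (List String)) (num_asiento : Int), Dom_comprobarasiento arreglo num_asiento → Pre_comprobarasiento arreglo num_asiento → Spec_comprobarasiento arreglo num_asiento (comprobarasiento arreglo num_asiento)

-- ===== LEMMAS AND PROOFS =====

-- str(n) is injective: digit strings determine the number.
lemma pvToDigits_ne_nil (n : Nat) : Nat.toDigits 10 n ≠ [] := by
  rw [Nat.toDigits_eq_if (by norm_num)]
  split <;> simp

lemma pvDigitChar_inj {a b : Nat} (ha : a < 10) (hb : b < 10)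
    (h : Nat.digitChar a = Nat.digitChar b) : a = b := by
  interval_cases a <;> interval_cases b <;> revert h <;> decide

lemma pvToDigits10_inj : ∀ a b : Nat, Nat.toDigits 10 a = Nat.toDigits 10 b → a = b := by
  intro a
  induction a using Nat.strong_induction_on with
  | _ a ih =>
    intro b h
    rw [Nat.toDigits_eq_if (b := 10) (n := a) (by norm_num),
        Nat.toDigits_eq_if (b := 10) (n := b) (by norm_num)] at h
    by_cases ha : a < 10 <;> by_cases hb : b < 10
    · rw [if_pos ha, if_pos hb] at h
      exact pvDigitChar_inj ha hb (by simpa using h)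
    · exfalso
      rw [if_pos ha, if_neg hb] at h
      have hlen := congrArg List.length h
      simp only [List.length_cons, List.length_append, List.length_nil] at hlen
      have hb' : 0 < (Nat.toDigits 10 (b / 10)).length :=
        List.length_pos_of_ne_nil (pvToDigits_ne_nil (b / 10))
      omega
    · exfalso
      rw [if_neg ha, if_pos hb] at h
      have hlen := congrArg List.length h
      simp only [List.length_cons, List.length_append, List.length_nil] at hlen
      have ha' : 0 < (Nat.toDigits 10 (a / 10)).length :=
        List.length_pos_of_ne_nil (pvToDigits_ne_nil (a / 10))
      omega
    · rw [if_neg ha, if_neg hb, ← List.concat_eq_append, ← List.concat_eq_append,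
        List.concat_inj] at h
      have h1 : a / 10 = b / 10 := ih (a / 10) (by omega) _ h.1
      have h2 : a % 10 = b % 10 :=
        pvDigitChar_inj (Nat.mod_lt _ (by norm_num)) (Nat.mod_lt _ (by norm_num)) h.2
      omega

lemma pvMem_toDigits_ne_dash : ∀ n : Nat, ∀ c ∈ Nat.toDigits 10 n, c ≠ '-' := by
  intro n
  induction n using Nat.strong_induction_on with
  | _ n ih =>
    intro c hc
    rw [Nat.toDigits_eq_if (by norm_num : (1:Nat) < 10)] at hc
    split_ifs at hc with hn
    · simp at hc
      subst hc
      interval_cases n <;> decide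
    · rcases List.mem_append.mp hc with h | h
      · exact ih (n / 10) (by omega) c h
      · simp at h
        subst h
        have : n % 10 < 10 := Nat.mod_lt _ (by norm_num)
        interval_cases h : n % 10 <;> decide

lemma pvToChars_inj {a b : Int} (h : PySem.Int.toChars a = PySem.Int.toChars b) : a = b := by
  unfold PySem.Int.toChars at h
  split_ifs at h with h1 h2 h2
  · simp only [List.cons.injEq] at h
    have := pvToDigits10_inj _ _ h.2
    omega
  · exact absurd rfl (pvMem_toDigits_ne_dash b.toNat '-' (h ▸ List.mem_cons_self))
  · exact absurd rfl (pvMem_toDigits_ne_dash a.toNat '-' (h ▸ List.mem_cons_self))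
  · have := pvToDigits10_inj _ _ h
    omega

lemma pvToStr_inj {a b : Int} (h : PySem.Int.toStr a = PySem.Int.toStr b) : a = b := by
  apply pvToChars_inj
  have := congrArg String.toList h
  simpa [PySem.Int.toList_toStr] using this

lemma pvIf_toStr {α : Type} (x n : Int) (A B : α) :
    (if PySem.Int.toStr x = PySem.Int.toStr n then A else B) = (if x = n then A else B) := by
  by_cases h : x = n
  · subst h; simp
  · rw [if_neg h, if_neg (fun hc => h (pvToStr_inj hc))]

lemma pvOk_bind {e a b : Type} (v : a) (g : a → Except e b) : (Except.ok v >>= g) = g v := rfl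

-- the cell A reads at row f, column c
def pvCell (arreglo : List (List String)) (f c : Nat) : String :=
  (PySem.List.pyGet? ((PySem.List.pyGet? arreglo (f : Int)).getD []) (c : Int)).getD ""

-- inner loop of A, characterised: starting from counter x₀ and scanning k columns of row f,
-- it early-returns false iff the seat number lands in this stretch and that cell is "X".
lemma pvInner (arreglo : List (List String)) (n : Int) (f : Nat) :
    ∀ (k : Nat) (x₀ : Int),
      (List.range k).foldlM (fun (x : Int) (c : Nat) =>
        let x := x + 1
        if PySem.Int.toStr x = PySem.Int.toStr n then
          if (PySem.List.pyGet? ((PySem.List.pyGet? arreglo (f : Int)).getD []) (c : Int)).getD "" = "X" then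
            Except.error false
          else Except.ok x
        else Except.ok x) x₀ =
      (if x₀ + 1 ≤ n ∧ n ≤ x₀ + k ∧ pvCell arreglo f (n - x₀ - 1).toNat = "X" then
        Except.error false
      else Except.ok (x₀ + k)) := by
  intro k
  induction k with
  | zero =>
    intro x₀
    simp only [List.range_zero, List.foldlM_nil, Nat.cast_zero, add_zero]
    rw [if_neg (by rintro ⟨h1, h2, -⟩; omega)]
    rfl
  | succ k ihk =>
    intro x₀
    rw [List.range_succ (n := k), List.foldlM_append, ihk]
    by_cases hin : x₀ + 1 ≤ n ∧ n ≤ x₀ + k ∧ pvCell arreglo f (n - x₀ - 1).toNat = "X"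
    · rw [if_pos hin, if_pos ⟨hin.1, by omega, hin.2.2⟩]
      rfl
    · rw [if_neg hin]
      rw [pvOk_bind]
      simp only [List.foldlM_cons, List.foldlM_nil, bind_pure]
      show (if PySem.Int.toStr (x₀ + ↑k + 1) = PySem.Int.toStr n then _ else _) = _
      rw [pvIf_toStr]
      by_cases hm : x₀ + (k : Int) + 1 = n
      · rw [if_pos hm]
        have hidx : (n - x₀ - 1).toNat = k := by omega
        by_cases hx : pvCell arreglo f k = "X"
        · rw [if_pos (by simpa [pvCell] using hx), if_pos ⟨by omega, by omega, by rw [hidx]; exact hx⟩]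
        · rw [if_neg (by simpa [pvCell] using hx), if_neg (by rw [hidx]; rintro ⟨-, -, h⟩; exact hx h)]
          congr 1; push_cast; ring
      · rw [if_neg hm, if_neg (by rintro ⟨h1, h2, h3⟩; exact hin ⟨h1, by omega, h3⟩)]
        congr 1; push_cast; ring

-- outer loop of A, characterised.
lemma pvOuter (arreglo : List (List String)) (n : Int) :
    ∀ (k : Nat),
      (List.range k).foldlM (fun (x : Int) (f : Nat) =>
        (List.range 10).foldlM (fun (x : Int) (c : Nat) =>
          let x := x + 1
          if PySem.Int.toStr x = PySem.Int.toStr n then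
            if (PySem.List.pyGet? ((PySem.List.pyGet? arreglo (f : Int)).getD []) (c : Int)).getD "" = "X" then
              Except.error false
            else Except.ok x
          else Except.ok x) x) (0 : Int) =
      (if 1 ≤ n ∧ n ≤ 10 * (k : Int) ∧ pvCell arreglo ((n - 1).toNat / 10) ((n - 1).toNat % 10) = "X" then
        Except.error false
      else Except.ok (10 * (k : Int))) := by
  intro k
  induction k with
  | zero =>
    simp only [List.range_zero, List.foldlM_nil, Nat.cast_zero, mul_zero]
    rw [if_neg (by rintro ⟨h1, h2, -⟩; omega)]
    rfl
  | succ k ihk =>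
    rw [List.range_succ (n := k), List.foldlM_append, ihk]
    by_cases hin : 1 ≤ n ∧ n ≤ 10 * (k : Int) ∧ pvCell arreglo ((n - 1).toNat / 10) ((n - 1).toNat % 10) = "X"
    · rw [if_pos hin, if_pos ⟨hin.1, by push_cast; omega, hin.2.2⟩]
      rfl
    · rw [if_neg hin]
      rw [pvOk_bind]
      simp only [List.foldlM_cons, List.foldlM_nil, bind_pure]
      rw [pvInner arreglo n k 10 (10 * k)]
      by_cases hm : 10 * (k : Int) + 1 ≤ n ∧ n ≤ 10 * (k : Int) + 10
      · have hf : (n - 1).toNat / 10 = k := by omega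
        have hc : (n - 10 * (k : Int) - 1).toNat = (n - 1).toNat % 10 := by omega
        by_cases hx : pvCell arreglo k ((n - 1).toNat % 10) = "X"
        · rw [if_pos ⟨by omega, by omega, by rw [hc]; exact hx⟩,
              if_pos ⟨by omega, by push_cast; omega, by rw [hf]; exact hx⟩]
        · rw [if_neg (by rw [hc]; rintro ⟨-, -, h⟩; exact hx h),
              if_neg (by rintro ⟨h1, h2, h3⟩; rw [hf] at h3; exact hx h3)]
          exact congrArg Except.ok (by push_cast; ring)
      · rw [if_neg (by rintro ⟨h1, h2, -⟩; exact hm ⟨by omega, by omega⟩),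
            if_neg (by rintro ⟨h1, h2, h3⟩
                       push_cast at h2
                       by_cases hk : n ≤ 10 * (k : Int)
                       · exact hin ⟨h1, hk, h3⟩
                       · exact hm ⟨by omega, by omega⟩)]
        exact congrArg Except.ok (by push_cast; ring)

-- A's port, in closed form.
lemma pvA_closed (arreglo : List (List String)) (n : Int) :
    comprobarasiento arreglo n =
      if 1 ≤ n ∧ n ≤ 100 ∧ pvCell arreglo ((n - 1).toNat / 10) ((n - 1).toNat % 10) = "X" then
        false
      else true := by
  unfold comprobarasiento
  rw [pvOuter arreglo n 10]
  by_cases h : 1 ≤ n ∧ n ≤ 10 * (10 : Nat) ∧ pvCell arreglo ((n - 1).toNat / 10) ((n - 1).toNat % 10) = "X"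
  · rw [if_pos h, if_pos ⟨h.1, by have := h.2.1; norm_num at this ⊢; omega, h.2.2⟩]
  · rw [if_neg h, if_neg (by rintro ⟨h1, h2, h3⟩; exact h ⟨h1, by norm_num; omega, h3⟩)]

lemma pvFloordiv_eq (n : Int) (h1 : 1 ≤ n) :
    PySem.Int.floordiv (n - 1) 10 = (((n - 1).toNat / 10 : Nat) : Int) := by
  unfold PySem.Int.floordiv
  rw [Int.fdiv_eq_ediv]
  omega

lemma pvMod_eq (n : Int) (h1 : 1 ≤ n) :
    PySem.Int.mod (n - 1) 10 = (((n - 1).toNat % 10 : Nat) : Int) := by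
  unfold PySem.Int.mod
  rw [Int.fmod_eq_emod]
  omega

-- ===== VERDICT (by name: the statement is the Claim_ definition above) =====
theorem comprobarasiento_spec : Claim_equal_comprobarasiento := by
  intro arreglo n _ _
  unfold Spec_comprobarasiento comprobarasiento_alt
  rw [pvA_closed]
  by_cases hb : 1 ≤ n ∧ n ≤ 100
  · rw [if_pos hb]
    simp only [pvFloordiv_eq n hb.1, pvMod_eq n hb.1]
    by_cases hx : pvCell arreglo ((n - 1).toNat / 10) ((n - 1).toNat % 10) = "X"
    · rw [if_pos ⟨hb.1, hb.2, hx⟩]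
      simp [pvCell] at hx
      simp [hx]
    · rw [if_neg (by rintro ⟨-, -, h⟩; exact hx h)]
      simp [pvCell] at hx
      simp [hx]
  · rw [if_neg hb, if_neg (by rintro ⟨h1, h2, -⟩; exact hb ⟨h1, h2⟩)]
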